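-- pv_equiv track=rewrite | github.com/MistakenPirate/cd_practice | dfa_101_110.py | dfa_contains_101_or_110
-- ===== SOURCE A (Python) =====
-- def dfa_contains_101_or_110(s):
--     state = 0  # Start state
--
--     for char in s:
--         if state == 0:
--             if char == '1':
--                 state = 1
--             else:
--                 state = 0
--
--         elif state == 1:
--             if char == '0':
--                 state = 2  # Could be 101
--             else:
--                 state = 4  # Could be 110
--
--         elif state == 2:
--             if char == '1':
--                 return True  # 101 matched
--             else:
--                 state = 0
--
--         elif state == 4:
--             if char == '0':
--                 return True  # 110 matched
--             else:
--                 state = 4  # Stay in potential 11 sequence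
--
--     return False
-- ===== SOURCE B (Python) =====
-- def dfa_contains_101_or_110(s):
--     return '101' in s or '110' in s
-- ===== Notes on version B (the rewrite author's own statement) =====
-- stated objective: simpler
-- what changed: Replaces the hand-written four-state DFA loop with a direct substring-containment test for '101' and '110' using Python's built-in search.
-- intended difference: On strings that contain neither '101' nor '110' but have a '1' followed immediately by a non-'0' character and a '0' at least two positions later (e.g. '1a0'), A returns True because its state 1 treats any non-'0' character as a second '1'; B returns False, which is the intended answer for 'contains 101 or 110'. — e.g. on dfa_contains_101_or_110("1a0"): A returns true, B returns false
import Mathlib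
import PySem

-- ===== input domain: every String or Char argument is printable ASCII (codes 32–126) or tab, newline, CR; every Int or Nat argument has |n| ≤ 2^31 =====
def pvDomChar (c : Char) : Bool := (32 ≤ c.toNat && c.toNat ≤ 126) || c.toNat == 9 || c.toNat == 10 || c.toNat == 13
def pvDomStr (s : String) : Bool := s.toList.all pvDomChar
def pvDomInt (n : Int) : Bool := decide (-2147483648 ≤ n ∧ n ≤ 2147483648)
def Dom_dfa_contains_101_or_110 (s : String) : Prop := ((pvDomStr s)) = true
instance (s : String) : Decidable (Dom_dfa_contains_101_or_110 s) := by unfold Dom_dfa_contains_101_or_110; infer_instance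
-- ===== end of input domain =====

-- B replaces the four-state DFA loop by a direct substring test for '101' and '110'
-- (objective: simpler); on the exceptional D_ inputs A's extra acceptance is a bug and B differs.

-- ===== PORT A =====
-- the for-loop with its early returns, state ∈ {0,1,2,4}
def pvDfaLoop : List Char → Int → Bool
  | [], _ => false
  | c :: rest, state =>
    if state = 0 then pvDfaLoop rest (if c = '1' then 1 else 0)
    else if state = 1 then pvDfaLoop rest (if c = '0' then 2 else 4)
    else if state = 2 then (if c = '1' then true else pvDfaLoop rest 0)
    else if state = 4 then (if c = '0' then true else pvDfaLoop rest 4)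
    else pvDfaLoop rest state

def dfa_contains_101_or_110 (s : String) : Bool := pvDfaLoop s.toList 0

-- ===== PORT B =====
-- "'101' in s or '110' in s"
def dfa_contains_101_or_110_alt (s : String) : Bool :=
  PySem.Str.isIn "101" s || PySem.Str.isIn "110" s

-- ===== PRECONDITION & SPEC =====
-- pvP l : some position holds '1', the next character is not '0', and a '0' occurs
-- at least two positions later (the "loose match" condition; input-only, used by D_)
def pvP : List Char → Bool
  | a :: b :: r => (a == '1' && b != '0' && r.contains '0') || pvP (b :: r)
  | _ => false

-- On strings containing neither '101' nor '110' but having a '1' followed by a non-'0'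
-- character and a '0' at least two positions later, A returns True (its state 1 treats any
-- non-'0' character as a second '1'); B returns False, the intended answer.
def D_dfa_contains_101_or_110 (s : String) : Prop :=
  PySem.Str.isIn "101" s = false ∧ PySem.Str.isIn "110" s = false ∧ pvP s.toList = true
instance (s : String) : Decidable (D_dfa_contains_101_or_110 s) := by
  unfold D_dfa_contains_101_or_110; infer_instance

def Spec_dfa_contains_101_or_110 (s : String) (out : Bool) : Prop :=
  ¬ D_dfa_contains_101_or_110 s → out = dfa_contains_101_or_110_alt s
instance (s : String) (out : Bool) : Decidable (Spec_dfa_contains_101_or_110 s out) := by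
  unfold Spec_dfa_contains_101_or_110; infer_instance

def pvDiffWitness_dfa_contains_101_or_110 : String := "1a0"
def pvDiffWitnessOut_dfa_contains_101_or_110 : Bool × Bool := (true, false)

-- ===== CLAIM (what is proved, stated in full; the proofs are below) =====
def Claim_unchanged_dfa_contains_101_or_110 : Prop :=
  ∀ (s : String), Dom_dfa_contains_101_or_110 s →
    Spec_dfa_contains_101_or_110 s (dfa_contains_101_or_110 s)
def Claim_changed_dfa_contains_101_or_110 : Prop :=
  Dom_dfa_contains_101_or_110 (pvDiffWitness_dfa_contains_101_or_110) ∧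
  D_dfa_contains_101_or_110 (pvDiffWitness_dfa_contains_101_or_110) ∧
  dfa_contains_101_or_110 (pvDiffWitness_dfa_contains_101_or_110) = pvDiffWitnessOut_dfa_contains_101_or_110.1 ∧
  dfa_contains_101_or_110_alt (pvDiffWitness_dfa_contains_101_or_110) = pvDiffWitnessOut_dfa_contains_101_or_110.2 ∧
  pvDiffWitnessOut_dfa_contains_101_or_110.1 ≠ pvDiffWitnessOut_dfa_contains_101_or_110.2
def Claim_exact_dfa_contains_101_or_110 : Prop :=
  ∀ (s : String), Dom_dfa_contains_101_or_110 s → D_dfa_contains_101_or_110 s →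
    dfa_contains_101_or_110 s ≠ dfa_contains_101_or_110_alt s

-- ===== LEMMAS AND PROOFS =====

lemma pvP_cons (a : Char) (l : List Char) :
    pvP (a :: l) = ((a == '1' && (match l with
      | b :: r => (b != '0' && r.contains '0')
      | [] => false)) || pvP l) := by
  cases l <;> simp [pvP, Bool.and_assoc]

lemma pvP_mem (l : List Char) (h : pvP l = true) : '0' ∈ l.drop 1 := by
  induction l with
  | nil => simp [pvP] at h
  | cons a l ih =>
    rw [pvP_cons] at h
    rcases Bool.or_eq_true_iff.mp h with h | h
    · cases l with
      | nil => simp at h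
      | cons b r =>
        simp only [Bool.and_eq_true, bne_iff_ne, List.contains_iff_mem] at h
        simp [h.2.2]
    · have := ih h
      have h2 : '0' ∈ l := List.drop_subset 1 l this
      simpa using h2

lemma pvDfaLoop4 (l : List Char) : pvDfaLoop l 4 = true ↔ '0' ∈ l := by
  induction l with
  | nil => simp [pvDfaLoop]
  | cons c r ih =>
    by_cases h : c = '0'
    · simp [pvDfaLoop, h]
    · simp [pvDfaLoop, h, ih]
      exact fun hh => absurd hh.symm h

lemma infix101_mem {l : List Char} (h : ['1', '0', '1'] <:+: l) : '0' ∈ l := by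
  exact h.subset (by simp)

-- A's loop from the start state computes "101 is an infix, or pvP"
lemma pvDfaLoop_zero (l : List Char) :
    pvDfaLoop l 0 = true ↔ (['1', '0', '1'] <:+: l ∨ pvP l = true) := by
  match l with
  | [] => simp [pvDfaLoop, pvP]
  | [a] =>
    constructor
    · intro h; exfalso
      by_cases ha : a = '1' <;> simp [pvDfaLoop] at h
    · rintro (h | h)
      · exact absurd (List.IsInfix.length_le h) (by simp)
      · simp [pvP] at h
  | a :: b :: r =>
    by_cases ha : a = '1'
    · subst ha
      by_cases hb : b = '0'
      · subst hb
        match r with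
        | [] =>
          constructor
          · intro h; exfalso; simp [pvDfaLoop] at h
          · rintro (h | h)
            · exact absurd (List.IsInfix.length_le h) (by simp)
            · simp [pvP] at h
        | c :: t =>
          by_cases hc : c = '1'
          · subst hc
            constructor
            · intro _; left; exact ⟨[], t, rfl⟩
            · intro _; simp [pvDfaLoop]
          · have ih := pvDfaLoop_zero t
            have hl : pvDfaLoop ('1' :: '0' :: c :: t) 0 = pvDfaLoop t 0 := by
              simp [pvDfaLoop, hc]
            rw [hl, ih]
            have hinf : (['1', '0', '1'] <:+: '1' :: '0' :: c :: t) ↔ ['1', '0', '1'] <:+: t := by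
              rw [List.infix_cons_iff, List.infix_cons_iff, List.infix_cons_iff]
              constructor
              · rintro (h | h | h | h)
                · rcases List.cons_prefix_cons.mp h with ⟨-, h⟩
                  rcases List.cons_prefix_cons.mp h with ⟨-, h⟩
                  rcases List.cons_prefix_cons.mp h with ⟨h1, -⟩
                  exact absurd h1.symm hc
                · rcases List.cons_prefix_cons.mp h with ⟨h1, -⟩
                  simp at h1
                · rcases List.cons_prefix_cons.mp h with ⟨h1, -⟩
                  exact absurd h1.symm hc
                · exact h
              · intro h; right; right; right; exact h
            have hP : pvP ('1' :: '0' :: c :: t) = pvP t := by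
              rw [pvP_cons, pvP_cons, pvP_cons]
              simp [hc]
            rw [hinf, hP]
      · -- a = '1', b ≠ '0' : state 4, accepts iff '0' ∈ r
        have hl : pvDfaLoop ('1' :: b :: r) 0 = pvDfaLoop r 4 := by
          simp [pvDfaLoop, hb]
        rw [hl, pvDfaLoop4]
        constructor
        · intro h; right
          rw [pvP_cons]
          simp [hb, h]
        · rintro (h | h)
          · rw [List.infix_cons_iff] at h
            rcases h with h | h
            · rcases List.cons_prefix_cons.mp h with ⟨-, h⟩
              rcases List.cons_prefix_cons.mp h with ⟨h1, -⟩
              exact absurd h1.symm hb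
            · have := infix101_mem h
              simp at this
              rcases this with h0 | h0
              · exact absurd h0.symm hb
              · exact h0
          · rw [pvP_cons] at h
            rcases Bool.or_eq_true_iff.mp h with h | h
            · simp only [Bool.and_eq_true, bne_iff_ne, List.contains_iff_mem] at h
              exact h.2.2
            · have := pvP_mem (b :: r) h
              simpa using this
    · -- a ≠ '1' : state stays 0
      have ih := pvDfaLoop_zero (b :: r)
      have hl : pvDfaLoop (a :: b :: r) 0 = pvDfaLoop (b :: r) 0 := by
        simp [pvDfaLoop, ha]
      rw [hl, ih]
      have hinf : (['1', '0', '1'] <:+: a :: b :: r) ↔ ['1', '0', '1'] <:+: b :: r := by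
        rw [List.infix_cons_iff]
        constructor
        · rintro (h | h)
          · rcases List.cons_prefix_cons.mp h with ⟨h1, -⟩
            exact absurd h1.symm ha
          · exact h
        · intro h; right; exact h
      have hP : pvP (a :: b :: r) = pvP (b :: r) := by
        rw [pvP_cons]; simp [ha]
      rw [hinf, hP]

-- the substring 110 satisfies the loose condition pvP
lemma infix110_pvP {l : List Char} (h : ['1', '1', '0'] <:+: l) : pvP l = true := by
  induction l with
  | nil => exact absurd (List.IsInfix.length_le h) (by simp)
  | cons a r ih =>
    rw [List.infix_cons_iff] at h
    rcases h with h | h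
    · rcases List.cons_prefix_cons.mp h with ⟨ha, h⟩
      cases r with
      | nil => exact absurd (List.IsPrefix.length_le h) (by simp)
      | cons b u =>
        rcases List.cons_prefix_cons.mp h with ⟨hb, h⟩
        cases u with
        | nil => exact absurd (List.IsPrefix.length_le h) (by simp)
        | cons c v =>
          rcases List.cons_prefix_cons.mp h with ⟨hc, -⟩
          rw [pvP_cons]
          simp [← ha, ← hb, ← hc]
    · rw [pvP_cons, ih h]
      simp

-- ===== VERDICT (by name: the statements are the Claim_ definitions above) =====
theorem dfa_contains_101_or_110_spec : Claim_unchanged_dfa_contains_101_or_110 := by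
  intro s _ hnd
  unfold dfa_contains_101_or_110 dfa_contains_101_or_110_alt
  by_cases h101 : PySem.Str.isIn "101" s = true
  · have hinf : ("101".toList <:+: s.toList) := (PySem.Str.isIn_iff_infix _ _).mp h101
    rw [h101, Bool.true_or]
    rw [pvDfaLoop_zero]
    left; simpa using hinf
  · have h101' : PySem.Str.isIn "101" s = false := by simpa using h101
    have hn101 : ¬ (['1', '0', '1'] <:+: s.toList) := fun hc =>
      h101 ((PySem.Str.isIn_iff_infix _ _).mpr (by simpa using hc))
    by_cases h110 : PySem.Str.isIn "110" s = true
    · have hinf : ("110".toList <:+: s.toList) := (PySem.Str.isIn_iff_infix _ _).mp h110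
      have hp : pvP s.toList = true := infix110_pvP (by simpa using hinf)
      rw [h110, Bool.or_true]
      rw [pvDfaLoop_zero]
      right; exact hp
    · have h110' : PySem.Str.isIn "110" s = false := by simpa using h110
      have hp : pvP s.toList = false := by
        by_contra hc
        exact hnd ⟨h101', h110', by simpa using hc⟩
      rw [h101', h110']
      simp only [Bool.or_false]
      rw [Bool.eq_false_iff]
      intro hc
      rcases (pvDfaLoop_zero s.toList).mp hc with h | h
      · exact hn101 h
      · rw [hp] at h; exact Bool.false_ne_true h

theorem dfa_contains_101_or_110_changed : Claim_changed_dfa_contains_101_or_110 := by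
  unfold Claim_changed_dfa_contains_101_or_110; decide

theorem dfa_contains_101_or_110_tight : Claim_exact_dfa_contains_101_or_110 := by
  intro s _ hd
  obtain ⟨h101, h110, hp⟩ := hd
  unfold dfa_contains_101_or_110 dfa_contains_101_or_110_alt
  have hA : pvDfaLoop s.toList 0 = true := (pvDfaLoop_zero s.toList).mpr (Or.inr hp)
  rw [hA, h101, h110]
  simp
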